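-- pv_equiv track=rewrite | github.com/glaucomori/Data_Science | Challenges/challenge10.py | shuffle_musicas
-- ===== SOURCE A (Python) =====
-- def shuffle_musicas(musicas_tocadas):
--     lista_de_musicas = []
--     lista_ordenada = sorted(musicas_tocadas)
--     for i in range(len(lista_ordenada)):
--         u = lista_ordenada[-1]
--         lista_de_musicas.append(u)
--         lista_ordenada.pop()
--         lista_ordenada.reverse()
--
--     return lista_de_musicas
-- ===== SOURCE B (Python) =====
-- def shuffle_musicas(musicas_tocadas):
--     s = sorted(musicas_tocadas)
--     desc = s[::-1]
--     return [desc[i // 2] if i % 2 == 0 else s[i // 2] for i in range(len(s))]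
-- ===== Notes on version B (the rewrite author's own statement) =====
-- stated objective: faster
-- what changed: replaces A's loop that repeatedly pops the last element and reverses the whole remaining list with a single sort, one reversed copy, and a non-looping index-map comprehension reading desc[i//2] for even i and s[i//2] for odd i
import Mathlib
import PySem

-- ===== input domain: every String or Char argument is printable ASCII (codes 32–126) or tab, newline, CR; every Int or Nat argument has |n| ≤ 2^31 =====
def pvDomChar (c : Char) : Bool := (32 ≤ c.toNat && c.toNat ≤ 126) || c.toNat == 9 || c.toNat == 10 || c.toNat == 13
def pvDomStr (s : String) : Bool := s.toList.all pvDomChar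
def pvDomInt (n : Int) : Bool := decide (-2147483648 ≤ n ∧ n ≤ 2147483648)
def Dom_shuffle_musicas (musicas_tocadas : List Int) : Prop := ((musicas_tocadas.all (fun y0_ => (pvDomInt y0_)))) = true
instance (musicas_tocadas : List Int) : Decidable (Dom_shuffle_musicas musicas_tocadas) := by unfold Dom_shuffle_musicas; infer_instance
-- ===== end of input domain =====

-- B replaces A's quadratic pop-last-then-reverse loop by one sort plus a direct index-map comprehension (objective: faster, asymptotic).

-- ===== PORT A =====
-- the for-loop over range(len(lista_ordenada)): state = (remaining list, accumulator)
def shuffleA_go : Nat → List Int → List Int → List Int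
  | 0, _, out => out
  | n+1, ord, out =>
    match PySem.List.pyGet? ord (-1) with
    | none => out  -- unreachable: the list is nonempty on every iteration
    | some u => shuffleA_go n (ord.dropLast.reverse) (out ++ [u])

def shuffle_musicas (musicas_tocadas : List Int) : List Int :=
  let lista_ordenada := PySem.List.sorted musicas_tocadas (fun x => x) false
  shuffleA_go lista_ordenada.length lista_ordenada []

-- ===== PORT B =====
def shuffle_musicas_alt (musicas_tocadas : List Int) : List Int :=
  let s := PySem.List.sorted musicas_tocadas (fun x => x) false
  let desc := (PySem.List.slice? s none none (-1)).getD []   -- s[::-1]; step ≠ 0, never none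
  (PySem.List.pyRange 0 (s.length : Int) 1).map (fun i =>
    if PySem.Int.mod i 2 = 0 then PySem.List.pyGetD desc (PySem.Int.floordiv i 2) 0
    else PySem.List.pyGetD s (PySem.Int.floordiv i 2) 0)

-- ===== PRECONDITION & SPEC =====
def Spec_shuffle_musicas (musicas_tocadas : List Int) (out : List Int) : Prop := out = shuffle_musicas_alt musicas_tocadas
instance (musicas_tocadas : List Int) (out : List Int) : Decidable (Spec_shuffle_musicas musicas_tocadas out) := by unfold Spec_shuffle_musicas; infer_instance

-- ===== CLAIM (what is proved, stated in full; the proofs are below) =====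
def Claim_equal_shuffle_musicas : Prop := ∀ (musicas_tocadas : List Int), Dom_shuffle_musicas musicas_tocadas → Spec_shuffle_musicas musicas_tocadas (shuffle_musicas musicas_tocadas)

-- ===== LEMMAS AND PROOFS =====

-- a common characterisation of both programs: alternately take the head of the
-- high (descending) list and of the low (ascending) list, n elements in all
def pvWeave : Nat → List Int → List Int → List Int
  | 0, _, _ => []
  | _+1, [], _ => []
  | n+1, a :: hi, lo => a :: pvWeave n lo hi

lemma pvWeave_congr : ∀ (n : Nat) (h1 h2 l1 l2 : List Int),
    h1.take n = h2.take n → l1.take n = l2.take n → pvWeave n h1 l1 = pvWeave n h2 l2 := by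
  intro n
  induction n with
  | zero => intro _ _ _ _ _ _; rfl
  | succ n ih =>
    intro h1 h2 l1 l2 hh hl
    cases h1 with
    | nil =>
      cases h2 with
      | nil => rfl
      | cons b t2 => simp [List.take_succ_cons] at hh
    | cons a t1 =>
      cases h2 with
      | nil => simp at hh
      | cons b t2 =>
        simp only [List.take_succ_cons, List.cons.injEq] at hh
        obtain ⟨hab, ht⟩ := hh
        subst hab
        simp only [pvWeave]
        congr 1
        apply ih
        · have := congrArg (List.take n) hl
          simpa [List.take_take] using this
        · have := congrArg (List.take n) ht
          simpa [List.take_take] using this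

lemma shuffleA_go_eq : ∀ (n : Nat) (s out : List Int), s.length = n →
    shuffleA_go n s out = out ++ pvWeave n s.reverse s := by
  intro n
  induction n with
  | zero =>
    intro s out h
    have : s = [] := List.length_eq_zero_iff.mp h
    subst this; simp [shuffleA_go, pvWeave]
  | succ n ih =>
    intro s out h
    have hne : s ≠ [] := by intro hs; subst hs; simp at h
    have hget : PySem.List.pyGet? s (-1) = some (s.getLast hne) := by
      rw [PySem.List.pyGet?_neg_one, List.getLast?_eq_getLast hne]
    have hlen : (s.dropLast.reverse).length = n := by
      simp [List.length_dropLast, h]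
    have hstep : shuffleA_go (n+1) s out
        = shuffleA_go n (s.dropLast.reverse) (out ++ [s.getLast hne]) := by
      simp [shuffleA_go, hget]
    rw [hstep, ih _ _ hlen]
    have hrev : s.reverse = s.getLast hne :: s.dropLast.reverse := by
      conv_lhs => rw [← List.dropLast_append_getLast hne]
      simp
    rw [hrev]
    simp only [pvWeave, List.reverse_reverse, List.append_assoc, List.singleton_append]
    congr 2
    apply pvWeave_congr
    · -- dropLast s and s agree on the first n elements
      have : s.dropLast = s.take n := by
        rw [List.dropLast_eq_take]; congr 1; omega
      rw [this, List.take_take]; congr 1; omega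
    · rfl

lemma pvWeave_eq_map : ∀ (n : Nat) (hi lo : List Int), n ≤ hi.length → n ≤ lo.length →
    pvWeave n hi lo
      = (List.range n).map (fun i => if i % 2 = 0 then hi.getD (i/2) 0 else lo.getD (i/2) 0) := by
  intro n
  induction n with
  | zero => intro _ _ _ _; rfl
  | succ n ih =>
    intro hi lo hhi hlo
    cases hi with
    | nil => simp at hhi
    | cons a t =>
      simp only [pvWeave]
      rw [List.range_succ_eq_map, List.map_cons, List.map_map]
      refine List.cons_eq_cons.mpr ⟨by simp, ?_⟩
      rw [ih lo t (by omega) (by simpa using hhi)]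
      apply List.map_congr_left
      intro i _
      show (if i % 2 = 0 then lo.getD (i/2) 0 else t.getD (i/2) 0)
          = if i.succ % 2 = 0 then (a :: t).getD (i.succ/2) 0 else lo.getD (i.succ/2) 0
      rw [Nat.succ_eq_add_one]
      by_cases hp : i % 2 = 0
      · have h1 : (i + 1) % 2 ≠ 0 := by omega
        have h2 : (i + 1) / 2 = i / 2 := by omega
        rw [if_pos hp, if_neg h1, h2]
      · have h1 : (i + 1) % 2 = 0 := by omega
        have h2 : (i + 1) / 2 = i / 2 + 1 := by omega
        rw [if_neg hp, if_pos h1, h2, List.getD_cons_succ]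

-- ===== VERDICT (by name: the statement is the Claim_ definition above) =====
theorem shuffle_musicas_spec : Claim_equal_shuffle_musicas := by
  intro m _
  unfold Spec_shuffle_musicas shuffle_musicas shuffle_musicas_alt
  simp only [PySem.List.slice?_none_none_neg_one, Option.getD_some]
  set s := PySem.List.sorted m (fun x => x) false with hs
  rw [shuffleA_go_eq s.length s [] rfl]
  simp only [List.nil_append]
  rw [pvWeave_eq_map s.length s.reverse s (by simp) (le_refl _)]
  rw [PySem.List.pyRange_one]
  simp only [sub_zero, Int.toNat_natCast, List.map_map]
  apply List.map_congr_left
  intro i _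
  simp only [Function.comp_apply, zero_add]
  have hm : PySem.Int.mod (i : Int) 2 = ((i % 2 : Nat) : Int) := by
    exact_mod_cast PySem.Int.mod_natCast i 2
  have hf : PySem.Int.floordiv (i : Int) 2 = ((i / 2 : Nat) : Int) := by
    exact_mod_cast PySem.Int.floordiv_natCast i 2
  rw [hm, hf, PySem.List.pyGetD_natCast, PySem.List.pyGetD_natCast]
  by_cases hp : i % 2 = 0
  · simp [hp]
  · have h2 : ¬ ((2:Int) ∣ (i:Int)) := by
      exact_mod_cast (by omega : ¬ (2:Nat) ∣ i)
    simp [hp, h2]
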